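-- pv_equiv track=rewrite | github.com/uandes-icc3201-201920/tarea-3-tarea-3-fjji-ifgarces | server.py | CheckError_Syntax
-- ===== SOURCE A (Python) =====
-- def CheckError_Syntax(request_msj):     # si está mal, retorna True
-- 	"""
-- 		<command>\n
-- 		[other_parms]
-- 	"""
-- 	_msjlines = request_msj.split("\n")[:-2]   # no pesca la última línea vacía
-- 	if (len(_msjlines) == 1): return False
-- 	if (len(_msjlines) > 1):
-- 		_extra_parms_lst = _msjlines[1:]
-- 		valid_parmNames = ["Host port", "Server port",  # de comando 'connect'
-- 		                   "Key", "Value", "ValType"]   # de varios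
-- 		for item in _extra_parms_lst:
-- 			try: _parm_name = item.split(":")[0]
-- 			except: return True
-- 			if (":" not in item): return True
-- 			if (_parm_name in valid_parmNames):
-- 				valid_parmNames.remove(_parm_name)    # removiendo para verificar que no salga repetido un parámetro
-- 			else: return True    # parámetro repetido o no reconocido
-- 	return False
-- ===== SOURCE B (Python) =====
-- def CheckError_Syntax(request_msj):
--     # collect-then-validate: one pass gathers parameter names (failing fast on a
--     # line without ':'), then a set-based check rejects unknown or repeated names
--     _msjlines = request_msj.split("\n")[:-2]
--     names = []
--     for item in _msjlines[1:]:
--         if ":" not in item: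
--             return True
--         names.append(item.split(":")[0])
--     valid = {"Host port", "Server port", "Key", "Value", "ValType"}
--     return any(n not in valid for n in names) or len(names) != len(set(names))
-- ===== Notes on version B (the rewrite author's own statement) =====
-- stated objective: simpler
-- what changed: Replaced the single loop that mutates a shrinking valid-name list (removing each seen name to detect repeats) by a collect-then-validate decomposition: one pass gathers the names (returning True on a line without ':'), then a fixed set membership check plus a len(names) != len(set(names)) duplicate check decide the result; the 0/1-line guards disappear since an empty tail yields False.
import Mathlib
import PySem

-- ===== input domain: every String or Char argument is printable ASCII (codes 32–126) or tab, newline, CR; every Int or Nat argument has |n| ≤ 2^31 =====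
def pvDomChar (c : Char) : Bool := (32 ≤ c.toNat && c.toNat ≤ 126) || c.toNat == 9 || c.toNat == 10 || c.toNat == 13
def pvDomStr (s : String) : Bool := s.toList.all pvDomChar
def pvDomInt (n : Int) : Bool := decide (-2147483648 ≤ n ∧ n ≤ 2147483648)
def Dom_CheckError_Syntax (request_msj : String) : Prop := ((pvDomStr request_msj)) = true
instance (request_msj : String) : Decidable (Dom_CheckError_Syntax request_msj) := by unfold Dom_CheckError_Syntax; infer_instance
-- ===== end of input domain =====

-- ===== PORT A =====
-- B changes: collect-then-validate decomposition (gather names, then set-based checks) instead of A's single loop mutating a shrinking valid-name list; objective: simpler.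

-- s.split(sep) for a nonempty sep (both ports only ever split on "\n" and ":"):
-- PySem.Str.split? is none exactly for sep = "", so .getD [] is exact here.
def pvSplit (s sep : String) : List String := (PySem.Str.split? s sep).getD []

-- the mutable valid_parmNames list A starts from
def pvValidParms : List String := ["Host port", "Server port", "Key", "Value", "ValType"]

-- the for-loop of A: state = remaining valid_parmNames list
def pvLoopA : List String → List String → Bool
  | _, [] => false
  | valid, item :: rest =>
    -- try: _parm_name = item.split(":")[0]  (split always returns a nonempty list, so the
    -- except branch — returning True — is unreachable; ported faithfully via the Option)
    match PySem.List.pyGet? (pvSplit item ":") 0 with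
    | none => true
    | some parmName =>
      if PySem.Str.isIn ":" item = false then true
      else if parmName ∈ valid then
        -- valid_parmNames.remove(_parm_name): remove of a member is erase of the first occurrence
        pvLoopA (valid.erase parmName) rest
      else true

def CheckError_Syntax (request_msj : String) : Bool :=
  let msjlines := PySem.List.slice (pvSplit request_msj "\n") none (some (-2))
  if msjlines.length == 1 then false
  else if msjlines.length > 1 then
    pvLoopA pvValidParms (PySem.List.slice msjlines (some 1) none)
  else false

-- ===== PORT B =====
def pvValidSet : PySem.Set String :=
  PySem.Set.ofList ["Host port", "Server port", "Key", "Value", "ValType"]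

-- B's collecting pass: none = an early 'return True' (a line without ':'),
-- some names = the list of collected parameter names, in order.
-- item.split(":")[0] never fails (split returns a nonempty list): ported with pyGetD default "".
def pvCollectB : List String → Option (List String)
  | [] => some []
  | item :: rest =>
    if PySem.Str.isIn ":" item = false then none
    else (pvCollectB rest).map (fun ns => PySem.List.pyGetD (pvSplit item ":") 0 "" :: ns)

def CheckError_Syntax_alt (request_msj : String) : Bool :=
  let msjlines := PySem.List.slice (pvSplit request_msj "\n") none (some (-2))
  match pvCollectB (PySem.List.slice msjlines (some 1) none) with
  | none => true
  | some names =>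
    names.any (fun n => !(PySem.Set.contains pvValidSet n))
      || (PySem.List.len names != PySem.Set.len (PySem.Set.ofList names))

-- ===== PRECONDITION & SPEC =====
def Spec_CheckError_Syntax (request_msj : String) (out : Bool) : Prop := out = CheckError_Syntax_alt request_msj
instance (request_msj : String) (out : Bool) : Decidable (Spec_CheckError_Syntax request_msj out) := by unfold Spec_CheckError_Syntax; infer_instance

-- ===== CLAIM (what is proved, stated in full; the proofs are below) =====
def Claim_equal_CheckError_Syntax : Prop := ∀ (request_msj : String), Dom_CheckError_Syntax request_msj → Spec_CheckError_Syntax request_msj (CheckError_Syntax request_msj)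

-- ===== LEMMAS AND PROOFS =====

theorem pvGo_ne_nil (sep : List Char) : ∀ (fuel : Nat) (l cur : List Char) (acc : List (List Char)),
    PySem.Chars.splitOn.go sep fuel l cur acc ≠ [] := by
  intro fuel
  induction fuel with
  | zero => intro l cur acc; simp [PySem.Chars.splitOn.go]
  | succ n ih =>
    intro l cur acc
    cases l with
    | nil => simp [PySem.Chars.splitOn.go]
    | cons c rest =>
      rw [PySem.Chars.splitOn.go]
      split_ifs with h
      · exact ih _ _ _
      · exact ih _ _ _

theorem pvSplit_ne_nil (s sep : String) (h : sep.toList ≠ []) : pvSplit s sep ≠ [] := by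
  simp only [pvSplit, PySem.Str.split?, PySem.Chars.split?, List.isEmpty_iff, h, if_false,
    reduceIte, Option.map_some, Option.getD_some, ne_eq, List.map_eq_nil_iff]
  exact pvGo_ne_nil _ _ _ _ _

-- set(ns) has as many elements as ns exactly when ns has no duplicates
theorem pvSetLen_eq_iff (ns : List String) : (PySem.Set.ofList ns).length = ns.length ↔ ns.Nodup := by
  induction ns with
  | nil => simp [PySem.Set.ofList_nil]
  | cons x xs ih =>
    rw [PySem.Set.ofList_cons]
    by_cases hx : x ∈ xs
    · have hmem : x ∈ PySem.Set.ofList xs := (PySem.Set.mem_ofList xs x).2 hx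
      have hlt : ((PySem.Set.ofList xs).filter (fun y => y != x)).length < (PySem.Set.ofList xs).length := by
        apply List.length_filter_lt_length_iff_exists.2
        exact ⟨x, hmem, by simp⟩
      have hle := PySem.Set.length_ofList_le xs
      constructor
      · intro h
        exfalso
        have hd : (PySem.Set.discard (PySem.Set.ofList xs) x).length = ((PySem.Set.ofList xs).filter (fun y => y != x)).length := rfl
        simp only [List.length_cons, hd] at h
        omega
      · intro h
        exact absurd hx (by simp_all)
    · have hnm : x ∉ PySem.Set.ofList xs := fun h => hx ((PySem.Set.mem_ofList xs x).1 h)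
      have hdis : PySem.Set.discard (PySem.Set.ofList xs) x = PySem.Set.ofList xs := by
        show (PySem.Set.ofList xs).filter (fun y => y != x) = _
        apply List.filter_eq_self.2
        intro a ha
        simp only [bne_iff_ne, ne_eq]
        exact fun he => hnm (he ▸ ha)
      rw [hdis]
      simp only [List.length_cons, List.nodup_cons]
      constructor
      · intro h; exact ⟨hx, ih.1 (by omega)⟩
      · intro h; rw [ih.2 h.2]

-- core invariant: A's loop accepts (returns false) exactly when B's collecting pass
-- succeeds with names that are pairwise distinct and all in the remaining valid list
theorem pvLoop_false_iff (ls : List String) : ∀ (valid : List String), valid.Nodup →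
    (pvLoopA valid ls = false ↔
      ∃ ns, pvCollectB ls = some ns ∧ ns.Nodup ∧ ∀ n ∈ ns, n ∈ valid) := by
  induction ls with
  | nil => intro valid _; simp [pvLoopA, pvCollectB]
  | cons item rest ih =>
    intro valid hV
    obtain ⟨x, xs, hsp⟩ := List.exists_cons_of_ne_nil (pvSplit_ne_nil item ":" (by decide))
    by_cases hc : PySem.Chars.isIn [':'] item.toList = false
    · simp [pvLoopA, pvCollectB, hsp, hc, PySem.Str.isIn_eq]
    · have hc' : PySem.Chars.isIn [':'] item.toList = true := by
        cases h : PySem.Chars.isIn [':'] item.toList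
        · exact absurd h hc
        · rfl
      have h0 : PySem.List.pyGet? (pvSplit item ":") 0 = some x := by rw [hsp]; simp [pysem]
      have h0D : PySem.List.pyGetD (pvSplit item ":") 0 "" = x := by rw [hsp]; simp [pysem]
      simp only [pvLoopA, pvCollectB, h0, h0D, PySem.Str.isIn_eq,
        show (":".toList) = [':'] from rfl, hc', Bool.true_eq_false, if_false]
      by_cases hxv : x ∈ valid
      · rw [if_pos hxv]
        rw [ih (valid.erase x) (hV.erase x)]
        constructor
        · rintro ⟨ms, hms, hnd, hsub⟩
          refine ⟨x :: ms, by simp [hms], ?_, ?_⟩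
          · refine List.nodup_cons.2 ⟨fun hxm => ?_, hnd⟩
            have := hsub x hxm
            exact (List.Nodup.mem_erase_iff hV).1 this |>.1 rfl
          · intro n hn
            rcases List.mem_cons.1 hn with rfl | hn
            · exact hxv
            · exact ((List.Nodup.mem_erase_iff hV).1 (hsub n hn)).2
        · rintro ⟨ns, hns, hnd, hsub⟩
          rcases Option.map_eq_some_iff.1 hns with ⟨ms, hms, rfl⟩
          refine ⟨ms, hms, (List.nodup_cons.1 hnd).2, fun n hn => ?_⟩
          refine (List.Nodup.mem_erase_iff hV).2 ⟨fun he => ?_, hsub n (by simp [hn])⟩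
          exact (List.nodup_cons.1 hnd).1 (he ▸ hn)
      · rw [if_neg hxv]
        simp only [Bool.true_eq_false, false_iff]
        rintro ⟨ns, hns, _, hsub⟩
        rcases Option.map_eq_some_iff.1 hns with ⟨ms, _, rfl⟩
        exact hxv (hsub x (by simp))

theorem pvBoolBridge (p q : Bool) (h : p = false ↔ q = false) : p = q := by
  cases p <;> cases q <;> simp_all

theorem pvMemValid (n : String) : PySem.Set.contains pvValidSet n = true ↔ n ∈ pvValidParms := by
  rw [PySem.Set.contains_iff]
  simp [pvValidSet, pvValidParms, PySem.Set.mem_ofList]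

theorem pvMainTail (ls : List String) :
    pvLoopA pvValidParms ls =
      (match pvCollectB ls with
       | none => true
       | some names =>
         names.any (fun n => !(PySem.Set.contains pvValidSet n))
           || (PySem.List.len names != PySem.Set.len (PySem.Set.ofList names))) := by
  apply pvBoolBridge
  rw [pvLoop_false_iff ls pvValidParms (by decide)]
  cases hcol : pvCollectB ls with
  | none => simp
  | some ns =>
    simp only [Option.some.injEq, Bool.or_eq_false_iff, List.any_eq_false, Bool.not_eq_true',
      Bool.not_eq_false, bne_eq_false_iff_eq]
    constructor
    · rintro ⟨ms, rfl, hnd, hsub⟩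
      refine ⟨fun n hn => (pvMemValid n).2 (hsub n hn), ?_⟩
      have hlen := (pvSetLen_eq_iff ns).2 hnd
      simp only [PySem.List.len, PySem.Set.len]
      omega
    · rintro ⟨hall, hlen⟩
      refine ⟨ns, rfl, ?_, fun n hn => (pvMemValid n).1 (hall n hn)⟩
      apply (pvSetLen_eq_iff ns).1
      simp only [PySem.List.len, PySem.Set.len] at hlen
      omega

-- ===== VERDICT (by name: the statement is the Claim_ definition above) =====
theorem CheckError_Syntax_spec : Claim_equal_CheckError_Syntax := by
  intro s _
  show CheckError_Syntax s = CheckError_Syntax_alt s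
  unfold CheckError_Syntax CheckError_Syntax_alt
  cases hL : PySem.List.slice (pvSplit s "\n") none (some (-2)) with
  | nil => simp [pvCollectB, PySem.List.slice, PySem.List.len, PySem.Set.len, PySem.Set.ofList]
  | cons a tail =>
    cases tail with
    | nil =>
      simp [PySem.List.slice_from_one, pvCollectB, PySem.List.len, PySem.Set.len, PySem.Set.ofList]
    | cons b t =>
      simp only [PySem.List.slice_from_one, List.length_cons, List.tail_cons]
      rw [if_neg (by simp), if_pos (by simp)]
      exact pvMainTail (b :: t)
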